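-- pv_equiv track=rewrite | github.com/alsabriraeed/MVGNAS | search_space/search_space.py | generate_action_list
-- ===== SOURCE A (Python) =====
-- def generate_action_list(num_of_model=1, cell=4, multi_architectures= True):
--     action_list = []
--     if multi_architectures:
--         for i in range(num_of_model):
--             for i in range(cell):
--                 action_list += [f"self_index_{i}", "gnn"]
--             action_list += ["act", "concat_type"]
--     else:
--         for i in range(cell):
--             action_list += [f"self_index_{i}", "gnn"]
--         action_list += ["act", "concat_type"]
--     return action_list
-- ===== SOURCE B (Python) =====
-- def _action_at(r, period):
--     if r == period - 2:
--         return "act"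
--     if r == period - 1:
--         return "concat_type"
--     return f"self_index_{r // 2}" if r % 2 == 0 else "gnn"
--
--
-- def generate_action_list(num_of_model=1, cell=4, multi_architectures=True):
--     reps = num_of_model if multi_architectures else 1
--     period = 2 * max(cell, 0) + 2
--     total = max(reps, 0) * period
--     return [_action_at(j % period, period) for j in range(total)]
-- ===== Notes on version B (the rewrite author's own statement) =====
-- stated objective: alternative
-- what changed: B replaces A's nested block-building loops with direct positional indexing: it computes the period 2*cell+2, the total output length, and derives each element from its index modulo the period (last two slots are 'act'/'concat_type', otherwise parity picks self_index_{r//2} or 'gnn').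
import Mathlib
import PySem

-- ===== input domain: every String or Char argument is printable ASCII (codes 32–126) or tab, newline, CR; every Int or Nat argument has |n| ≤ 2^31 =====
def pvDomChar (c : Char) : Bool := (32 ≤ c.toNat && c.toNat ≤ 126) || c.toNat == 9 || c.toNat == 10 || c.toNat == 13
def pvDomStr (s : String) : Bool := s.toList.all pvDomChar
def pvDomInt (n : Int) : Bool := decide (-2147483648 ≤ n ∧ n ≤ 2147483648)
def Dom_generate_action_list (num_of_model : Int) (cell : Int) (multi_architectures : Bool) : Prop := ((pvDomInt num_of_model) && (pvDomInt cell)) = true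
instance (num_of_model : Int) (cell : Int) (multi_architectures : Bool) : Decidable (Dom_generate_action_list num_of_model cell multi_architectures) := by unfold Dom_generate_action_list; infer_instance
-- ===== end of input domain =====

-- B computes each output element directly from its position (index arithmetic modulo the period) instead of A's nested block-building loops; objective: alternative.

-- ===== PORT A =====
def generate_action_list (num_of_model : Int) (cell : Int) (multi_architectures : Bool) : List String :=
  if multi_architectures then
    (PySem.List.pyRange 0 num_of_model 1).foldl
      (fun action_list _ =>
        ((PySem.List.pyRange 0 cell 1).foldl
          (fun action_list i => action_list ++ ["self_index_" ++ PySem.Int.toStr i, "gnn"])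
          action_list) ++ ["act", "concat_type"])
      []
  else
    ((PySem.List.pyRange 0 cell 1).foldl
      (fun action_list i => action_list ++ ["self_index_" ++ PySem.Int.toStr i, "gnn"])
      []) ++ ["act", "concat_type"]

-- ===== PORT B =====
def pv_action_at (r period : Int) : String :=
  if r = period - 2 then "act"
  else if r = period - 1 then "concat_type"
  else if PySem.Int.mod r 2 = 0 then "self_index_" ++ PySem.Int.toStr (PySem.Int.floordiv r 2)
  else "gnn"

def generate_action_list_alt (num_of_model : Int) (cell : Int) (multi_architectures : Bool) : List String :=
  let reps := if multi_architectures then num_of_model else 1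
  let period := 2 * max cell 0 + 2
  let total := max reps 0 * period
  (PySem.List.pyRange 0 total 1).map (fun j => pv_action_at (PySem.Int.mod j period) period)

-- ===== PRECONDITION & SPEC =====
def Spec_generate_action_list (num_of_model : Int) (cell : Int) (multi_architectures : Bool) (out : List String) : Prop := out = generate_action_list_alt num_of_model cell multi_architectures
instance (num_of_model : Int) (cell : Int) (multi_architectures : Bool) (out : List String) : Decidable (Spec_generate_action_list num_of_model cell multi_architectures out) := by unfold Spec_generate_action_list; infer_instance

-- ===== CLAIM (what is proved, stated in full; the proofs are below) =====
def Claim_equal_generate_action_list : Prop := ∀ (num_of_model : Int) (cell : Int) (multi_architectures : Bool), Dom_generate_action_list num_of_model cell multi_architectures → Spec_generate_action_list num_of_model cell multi_architectures (generate_action_list num_of_model cell multi_architectures)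

-- ===== LEMMAS AND PROOFS =====

-- parity-only part of pv_action_at (what it computes below period - 2)
def pv_h (r : Int) : String :=
  if PySem.Int.mod r 2 = 0 then "self_index_" ++ PySem.Int.toStr (PySem.Int.floordiv r 2) else "gnn"

-- A's per-model block, written as a flatMap
def pv_block (cell : Int) : List String :=
  ((PySem.List.pyRange 0 cell 1).flatMap
    (fun i => ["self_index_" ++ PySem.Int.toStr i, "gnn"])) ++ ["act", "concat_type"]

-- A constant 'out += block' loop is the block flattened length-many times.
theorem pv_foldl_const_append {α β : Type} (block : List β) (l : List α) (acc : List β) :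
    l.foldl (fun a _ => a ++ block) acc = acc ++ (List.replicate l.length block).flatten := by
  induction l generalizing acc with
  | nil => simp
  | cons x xs ih => simp [List.foldl_cons, ih, List.replicate_succ, List.append_assoc]

-- pv_h on an even/odd doubled range yields the self_index/gnn pairs
theorem pv_h_range (cn : Nat) :
    (PySem.List.pyRange 0 (2 * (cn : Int)) 1).map pv_h
      = (PySem.List.pyRange 0 (cn : Int) 1).flatMap
          (fun i => ["self_index_" ++ PySem.Int.toStr i, "gnn"]) := by
  induction cn with
  | zero => simp
  | succ k ih =>
      have h1 : (2 * ((k + 1 : Nat) : Int)) = (2 * (k : Int) + 1) + 1 := by push_cast; ring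
      have h2 : ((k + 1 : Nat) : Int) = (k : Int) + 1 := by push_cast; ring
      rw [h1, h2,
        PySem.List.pyRange_one_succ_right (a := 0) (by positivity),
        PySem.List.pyRange_one_succ_right (a := 0) (by positivity),
        PySem.List.pyRange_one_succ_right (a := 0) (by positivity)]
      simp only [List.map_append, List.flatMap_append, ih]
      simp [pv_h]

-- one full period of positional lookups is exactly A's per-model block
theorem pv_period_block (cn : Nat) :
    (PySem.List.pyRange 0 (2 * (cn : Int) + 2) 1).map
        (fun r => pv_action_at r (2 * (cn : Int) + 2))
      = pv_block (cn : Int) := by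
  have hsplit : PySem.List.pyRange 0 (2 * (cn : Int) + 2) 1
      = PySem.List.pyRange 0 (2 * (cn : Int)) 1 ++ [2 * (cn : Int), 2 * (cn : Int) + 1] := by
    have e1 : (2 : Int) * (cn : Int) + 2 = (2 * (cn : Int) + 1) + 1 := by ring
    rw [e1, PySem.List.pyRange_one_succ_right (a := 0) (by omega),
      PySem.List.pyRange_one_succ_right (a := 0) (by omega)]
    simp
  rw [hsplit, List.map_append]
  have hcong : (PySem.List.pyRange 0 (2 * (cn : Int)) 1).map
      (fun r => pv_action_at r (2 * (cn : Int) + 2))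
      = (PySem.List.pyRange 0 (2 * (cn : Int)) 1).map pv_h := by
    apply List.map_congr_left
    intro r hr
    rw [PySem.List.mem_pyRange_one] at hr
    simp only [pv_action_at, pv_h]
    rw [if_neg (by omega), if_neg (by omega)]
  have ha : pv_action_at (2 * (cn : Int)) (2 * (cn : Int) + 2) = "act" := by
    unfold pv_action_at; rw [if_pos (by omega)]
  have hb : pv_action_at (2 * (cn : Int) + 1) (2 * (cn : Int) + 2) = "concat_type" := by
    unfold pv_action_at; rw [if_neg (by omega), if_pos (by omega)]
  rw [hcong, pv_h_range]
  simp [pv_block, ha, hb]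

-- k periods of positional lookups are k copies of the block
theorem pv_total_blocks (cn k : Nat) :
    (PySem.List.pyRange 0 ((k : Int) * (2 * (cn : Int) + 2)) 1).map
        (fun j => pv_action_at (PySem.Int.mod j (2 * (cn : Int) + 2)) (2 * (cn : Int) + 2))
      = (List.replicate k (pv_block (cn : Int))).flatten := by
  have hp : (0 : Int) < 2 * (cn : Int) + 2 := by positivity
  induction k with
  | zero => simp
  | succ m ih =>
      have hk1 : (((m + 1 : Nat)) : Int) * (2 * (cn : Int) + 2)
          = (m : Int) * (2 * (cn : Int) + 2) + (2 * (cn : Int) + 2) := by push_cast; ring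
      rw [hk1,
        PySem.List.pyRange_one_append 0 ((m : Int) * (2 * (cn : Int) + 2))
          ((m : Int) * (2 * (cn : Int) + 2) + (2 * (cn : Int) + 2))
          (by positivity) (by omega),
        List.map_append, ih, List.replicate_succ', List.flatten_append]
      congr 1
      -- the fresh chunk: shift it down by m periods and use pv_period_block
      have hsh : PySem.List.pyRange ((m : Int) * (2 * (cn : Int) + 2))
            ((m : Int) * (2 * (cn : Int) + 2) + (2 * (cn : Int) + 2)) 1
          = (PySem.List.pyRange 0 (2 * (cn : Int) + 2) 1).map
              (fun t => (m : Int) * (2 * (cn : Int) + 2) + t) := by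
        rw [PySem.List.pyRange_one (a := ((m : Int) * (2 * (cn : Int) + 2))),
          PySem.List.pyRange_one (a := 0)]
        simp [List.map_map, Function.comp]
      rw [hsh, List.map_map]
      simp only [List.flatten_cons, List.flatten_nil, List.append_nil]
      rw [← pv_period_block cn]
      apply List.map_congr_left
      intro t ht
      rw [PySem.List.mem_pyRange_one] at ht
      have : PySem.Int.mod ((m : Int) * (2 * (cn : Int) + 2) + t) (2 * (cn : Int) + 2) = t := by
        rw [PySem.Int.mod_eq_emod_of_pos hp]
        rw [add_comm, Int.add_mul_emod_self_right, Int.emod_eq_of_lt ht.1 ht.2]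
      simp [Function.comp, this]

-- max c 0 as a Nat cast of toNat
theorem pv_max_toNat (c : Int) : max c 0 = ((c.toNat : Nat) : Int) := (Int.ofNat_toNat c).symm

-- pyRange 0 c 1 ignores the clamp to 0
theorem pv_pyRange_clamp (c : Int) :
    PySem.List.pyRange 0 c 1 = PySem.List.pyRange 0 ((c.toNat : Nat) : Int) 1 := by
  have h : (c - 0).toNat = (((c.toNat : Nat) : Int) - 0).toNat := by omega
  rw [PySem.List.pyRange_one, PySem.List.pyRange_one, h]

-- ===== VERDICT (by name: the statement is the Claim_ definition above) =====
theorem generate_action_list_spec : Claim_equal_generate_action_list := by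
  intro n c m _
  unfold Spec_generate_action_list generate_action_list generate_action_list_alt
  have hcast : (2 : Int) * max c 0 + 2 = 2 * ((c.toNat : Nat) : Int) + 2 := by
    rw [pv_max_toNat]
  have hA_inner : ∀ acc : List String,
      (PySem.List.pyRange 0 c 1).foldl
        (fun action_list i => action_list ++ ["self_index_" ++ PySem.Int.toStr i, "gnn"]) acc
      = acc ++ ((PySem.List.pyRange 0 c 1).flatMap
          (fun i => ["self_index_" ++ PySem.Int.toStr i, "gnn"])) := by
    intro acc
    rw [PySem.List.foldl_append_eq_flatMap]
  cases m with
  | false =>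
      simp only [Bool.false_eq_true, if_false]
      rw [hA_inner]
      have h1 : max (1 : Int) 0 = ((1 : Nat) : Int) := by norm_num
      simp only [hcast, h1]
      rw [pv_total_blocks c.toNat 1, pv_pyRange_clamp c]
      simp [pv_block]
  | true =>
      simp only [reduceIte]
      have hstep :
          (fun (action_list : List String) (_ : Int) =>
            ((PySem.List.pyRange 0 c 1).foldl
              (fun action_list i => action_list ++ ["self_index_" ++ PySem.Int.toStr i, "gnn"])
              action_list) ++ ["act", "concat_type"])
          = (fun (action_list : List String) (_ : Int) =>
            action_list ++
              (((PySem.List.pyRange 0 c 1).flatMap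
                (fun i => ["self_index_" ++ PySem.Int.toStr i, "gnn"])) ++ ["act", "concat_type"])) := by
        funext a _
        rw [hA_inner, List.append_assoc]
      rw [hstep, pv_foldl_const_append, PySem.List.length_pyRange_one]
      have hn : max n 0 = ((n.toNat : Nat) : Int) := (Int.ofNat_toNat n).symm
      simp only [hcast, hn]
      rw [pv_total_blocks c.toNat n.toNat]
      have hblk : pv_block ((c.toNat : Nat) : Int) = ((PySem.List.pyRange 0 c 1).flatMap
          (fun i => ["self_index_" ++ PySem.Int.toStr i, "gnn"])) ++ ["act", "concat_type"] := by
        rw [pv_pyRange_clamp c]; simp [pv_block]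
      rw [hblk]
      simp
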